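-- pv_equiv track=rewrite | github.com/granasat/startrackerpy | granasat/catalog/catalog.py | get_common_stars
-- ===== SOURCE A (Python) =====
-- def get_common_stars(triplets_a, triplets_b):
--     """Having two list of triplets of stars as parameters
--     return the stars which are in both triplets
--
--     basically, search if for any triplet in a there is a triplet in b which
--     contains two elements of the former one. In this case we have found
--     4 real stars, 2 of them we can identify their possition in the image,
--     the other two we are not sure (50%).
--
--     returns [[ImageStar, ImageStar], [Star, Star]]
--     """
--
--     common = []
--     news = []
--     for triplet_i in triplets_a:
--         for triplet_j in triplets_b:
--             if (triplet_i[0] in triplet_j and triplet_i[1] in triplet_j) or \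
--                (triplet_i[0] in triplet_j and triplet_i[2] in triplet_j) or \
--                (triplet_i[1] in triplet_j and triplet_i[2] in triplet_j):
--                 # Add all stars from triplet_i and the new one from
--                 # triplet_j
--                 common = [star for star in triplet_i if star in triplet_j]
--                 new_i = [star for star in triplet_i if star not in triplet_j]
--                 new_j = [star for star in triplet_j if star not in triplet_i]
--                 news = new_i + new_j
--
--     return [common, news]
-- ===== SOURCE B (Python) =====
-- def get_common_stars(triplets_a, triplets_b):
--     """Inverted-index version: map each star to the set of b-triplet indices
--     containing it, then for each a-triplet intersect the occurrence sets of
--     its star pairs to find the b-triplets sharing at least two stars."""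
--     occ = {}
--     for j, tj in enumerate(triplets_b):
--         for star in tj:
--             occ.setdefault(star, set()).add(j)
--     best = None
--     for ti in triplets_a:
--         t = ti[:3]
--         hits = set()
--         for x in range(len(t)):
--             for y in range(x + 1, len(t)):
--                 hits |= occ.get(t[x], set()) & occ.get(t[y], set())
--         if hits:
--             best = (ti, triplets_b[max(hits)])
--     if best is None:
--         return [[], []]
--     ti, tj = best
--     common = [star for star in ti if star in tj]
--     news = [star for star in ti if star not in tj] + \
--            [star for star in tj if star not in ti]
--     return [common, news]
-- ===== Notes on version B (the rewrite author's own statement) =====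
-- stated objective: faster
-- what changed: A's nested scan of all (a-triplet, b-triplet) pairs is replaced by an inverted index star -> set of b-indices built once; each a-triplet then intersects the occurrence sets of its star pairs and the largest hit index gives the matching b-triplet, so the inner scan over b disappears. Pre_ excludes only inputs where A raises IndexError (a-triplets shorter than 3 whose membership short-circuit reaches a missing index).
import Mathlib
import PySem

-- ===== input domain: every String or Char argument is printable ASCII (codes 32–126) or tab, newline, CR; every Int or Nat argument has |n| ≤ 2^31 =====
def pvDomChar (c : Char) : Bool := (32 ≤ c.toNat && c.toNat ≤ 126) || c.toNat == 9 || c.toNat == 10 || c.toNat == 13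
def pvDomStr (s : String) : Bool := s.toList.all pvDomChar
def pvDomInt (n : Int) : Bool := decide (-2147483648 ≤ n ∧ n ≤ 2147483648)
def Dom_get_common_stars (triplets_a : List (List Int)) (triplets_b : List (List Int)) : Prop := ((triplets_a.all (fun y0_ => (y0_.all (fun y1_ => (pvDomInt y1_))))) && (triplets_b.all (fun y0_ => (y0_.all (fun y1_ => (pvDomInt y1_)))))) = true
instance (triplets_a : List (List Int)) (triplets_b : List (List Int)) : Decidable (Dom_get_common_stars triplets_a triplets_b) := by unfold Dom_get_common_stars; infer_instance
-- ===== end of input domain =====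

-- B replaces A's nested scan of all (a-triplet, b-triplet) pairs by an inverted index
-- star -> set of b-indices; each a-triplet intersects the occurrence sets of its star
-- pairs and the largest hit index names the matching b-triplet.

-- ===== PORT A =====
-- the big or-of-ands condition of A's inner if (fully evaluated; under Pre_ the indexing is in range)
def condA (ti tj : List Int) : Bool :=
  (tj.contains (PySem.List.pyGetD ti 0 0) && tj.contains (PySem.List.pyGetD ti 1 0)) ||
  (tj.contains (PySem.List.pyGetD ti 0 0) && tj.contains (PySem.List.pyGetD ti 2 0)) ||
  (tj.contains (PySem.List.pyGetD ti 1 0) && tj.contains (PySem.List.pyGetD ti 2 0))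

def get_common_stars (triplets_a : List (List Int)) (triplets_b : List (List Int)) : List (List Int) :=
  let st := triplets_a.foldl (fun st ti =>
    triplets_b.foldl (fun st2 tj =>
      if condA ti tj then
        (ti.filter (fun star => tj.contains star),
         ti.filter (fun star => !tj.contains star) ++ tj.filter (fun star => !ti.contains star))
      else st2) st) (([], []) : List Int × List Int)
  [st.1, st.2]

-- ===== PORT B =====
-- occ[star] = set of indices j with star ∈ triplets_b[j]  ('occ.setdefault(star, set()).add(j)')
def occIndex (triplets_b : List (List Int)) : PySem.Dict Int (PySem.Set Int) :=
  (PySem.List.enumerate triplets_b).foldl (fun d p =>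
    p.2.foldl (fun d1 star =>
      d1.insert star (PySem.Set.add (d1.getD star PySem.Set.empty) p.1)) d)
    PySem.Dict.empty

-- hits = union over star pairs of ti[:3] of the intersections of their occurrence sets
def altHits (occ : PySem.Dict Int (PySem.Set Int)) (ti : List Int) : PySem.Set Int :=
  let t := PySem.List.slice ti none (some 3)
  (PySem.List.pyRange 0 (t.length : Int)).foldl (fun h x =>
    (PySem.List.pyRange (x + 1) (t.length : Int)).foldl (fun h2 y =>
      PySem.Set.union h2
        (PySem.Set.inter (occ.getD (PySem.List.pyGetD t x 0) PySem.Set.empty)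
                         (occ.getD (PySem.List.pyGetD t y 0) PySem.Set.empty))) h)
    PySem.Set.empty

def get_common_stars_alt (triplets_a : List (List Int)) (triplets_b : List (List Int)) : List (List Int) :=
  let occ := occIndex triplets_b
  let best := triplets_a.foldl (fun best ti =>
    match PySem.List.max? (altHits occ ti) (fun x => x) with
    | some m => some (ti, PySem.List.pyGetD triplets_b m [])
    | none => best)
    (none : Option (List Int × List Int))
  match best with
  | none => [[], []]
  | some (ti, tj) =>
    [ti.filter (fun star => tj.contains star),
     ti.filter (fun star => !tj.contains star) ++ tj.filter (fun star => !ti.contains star)]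

-- ===== PRECONDITION & SPEC =====
-- Exactly the inputs on which A returns (no IndexError): each a-triplet either has at least 3
-- stars, or has exactly 2 stars that are both-in-or-both-out of every b-triplet (then the
-- short-circuit never reaches the missing third index).
def Pre_get_common_stars (triplets_a : List (List Int)) (triplets_b : List (List Int)) : Prop :=
  ∀ ti ∈ triplets_a, ∀ tj ∈ triplets_b,
    3 ≤ ti.length ∨
    (ti.length = 2 ∧ (PySem.List.pyGetD ti 0 0 ∈ tj ↔ PySem.List.pyGetD ti 1 0 ∈ tj))
instance (triplets_a : List (List Int)) (triplets_b : List (List Int)) : Decidable (Pre_get_common_stars triplets_a triplets_b) := by unfold Pre_get_common_stars; infer_instance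

def pvWitness_get_common_stars : List (List Int) × List (List Int) :=
  ([[1, 2, 3], [4, 5, 6]], [[2, 3, 9], [7, 8, 9]])

def Spec_get_common_stars (triplets_a : List (List Int)) (triplets_b : List (List Int)) (out : List (List Int)) : Prop := out = get_common_stars_alt triplets_a triplets_b
instance (triplets_a : List (List Int)) (triplets_b : List (List Int)) (out : List (List Int)) : Decidable (Spec_get_common_stars triplets_a triplets_b out) := by unfold Spec_get_common_stars; infer_instance

-- ===== CLAIM (what is proved, stated in full; the proofs are below) =====
def Claim_equal_get_common_stars : Prop := ∀ (triplets_a : List (List Int)) (triplets_b : List (List Int)), Dom_get_common_stars triplets_a triplets_b → Pre_get_common_stars triplets_a triplets_b → Spec_get_common_stars triplets_a triplets_b (get_common_stars triplets_a triplets_b)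

-- ===== LEMMAS AND PROOFS =====

-- the pair A stores when triplet ti matches triplet tj
def hitA (ti tj : List Int) : List Int × List Int :=
  (ti.filter (fun star => tj.contains star),
   ti.filter (fun star => !tj.contains star) ++ tj.filter (fun star => !ti.contains star))

-- last b-triplet matching ti, and last matching (a-triplet, b-triplet) pair
def lastB (ti : List Int) (b : List (List Int)) : Option (List Int) :=
  (b.filter (fun tj => condA ti tj)).getLast?

def lastPair (a b : List (List Int)) : Option (List Int × List Int) :=
  (a.filterMap (fun ti => (lastB ti b).map (fun tj => (ti, tj)))).getLast?

def render (o : Option (List Int × List Int)) : List (List Int) :=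
  match o with
  | none => [[], []]
  | some (ti, tj) => [(hitA ti tj).1, (hitA ti tj).2]

-- index (as Int) of the last element of b satisfying Q, -1 if none
def lastHit (Q : List Int → Bool) (b : List (List Int)) : Int :=
  (PySem.List.enumerate b).foldl (fun acc p => if Q p.2 then p.1 else acc) (-1)

-- j matches ti in b: j is in range and A's condition holds at b[j]
def MatchIdx (b : List (List Int)) (ti : List Int) (j : Int) : Prop :=
  0 ≤ j ∧ j < (b.length : Int) ∧ condA ti (PySem.List.pyGetD b j []) = true

-- ---- A-side characterization ----

theorem innerA (ti : List Int) (b : List (List Int)) (st : List Int × List Int) :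
    b.foldl (fun st2 tj => if condA ti tj then hitA ti tj else st2) st
      = (lastB ti b).elim st (hitA ti) := by
  induction b using List.reverseRecOn generalizing st with
  | nil => simp [lastB]
  | append_singleton b t ih =>
    simp only [List.foldl_append, List.foldl_cons, List.foldl_nil, lastB, List.filter_append]
    by_cases h : condA ti t
    · simp [h]
    · simp only [h, if_neg, Bool.false_eq_true, not_false_iff, List.filter_cons_of_neg,
        List.filter_nil, List.append_nil]
      exact ih st

theorem foldA_eq (a b : List (List Int)) :
    a.foldl (fun st ti =>
      b.foldl (fun st2 tj =>
        if condA ti tj then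
          (ti.filter (fun star => tj.contains star),
           ti.filter (fun star => !tj.contains star) ++ tj.filter (fun star => !ti.contains star))
        else st2) st) (([], []) : List Int × List Int)
      = (lastPair a b).elim ([], []) (fun p => hitA p.1 p.2) := by
  have hbody : ∀ (st : List Int × List Int) ti,
      b.foldl (fun st2 tj =>
        if condA ti tj then
          (ti.filter (fun star => tj.contains star),
           ti.filter (fun star => !tj.contains star) ++ tj.filter (fun star => !ti.contains star))
        else st2) st
      = (lastB ti b).elim st (hitA ti) := fun st ti => innerA ti b st
  rw [PySem.List.foldl_congr_mem a _
    (fun st ti => (lastB ti b).elim st (hitA ti)) ([], []) (fun st ti _ => hbody st ti)]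
  induction a using List.reverseRecOn with
  | nil => simp [lastPair]
  | append_singleton a ti ih =>
    simp only [List.foldl_append, List.foldl_cons, List.foldl_nil, ih]
    unfold lastPair
    cases h : lastB ti b with
    | none => simp [h]
    | some tj => simp [h, List.filterMap_append]

theorem outerA (a b : List (List Int)) :
    get_common_stars a b = render (lastPair a b) := by
  simp only [get_common_stars, foldA_eq]
  cases hp : lastPair a b with
  | none => simp [render]
  | some p => cases p; simp [render]

-- ---- lastHit machinery ----

theorem pyGetD_append_lt {α : Type} (b : List α) (t : α) (j : Int) (d : α)
    (h0 : 0 ≤ j) (h : j < (b.length : Int)) :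
    PySem.List.pyGetD (b ++ [t]) j d = PySem.List.pyGetD b j d := by
  rw [PySem.List.pyGetD_eq_getElem _ _ h0 (by simp; omega),
      PySem.List.pyGetD_eq_getElem _ _ h0 (by exact_mod_cast h)]
  rw [List.getElem_append_left]

theorem pyGetD_append_self {α : Type} (b : List α) (t : α) (d : α) :
    PySem.List.pyGetD (b ++ [t]) (b.length : Int) d = t := by
  rw [PySem.List.pyGetD_natCast]; simp

theorem lastHit_append (Q : List Int → Bool) (b : List (List Int)) (t : List Int) :
    lastHit Q (b ++ [t]) = if Q t then (b.length : Int) else lastHit Q b := by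
  unfold lastHit
  rw [PySem.List.enumerate_append, List.foldl_append]
  simp [PySem.List.enumerate]

theorem lastHit_bound (Q : List Int → Bool) (b : List (List Int)) :
    -1 ≤ lastHit Q b ∧ lastHit Q b < (b.length : Int) := by
  induction b using List.reverseRecOn with
  | nil => simp [lastHit, PySem.List.enumerate]
  | append_singleton b t ih =>
    rw [lastHit_append]
    by_cases h : Q t <;> [simp [h, List.length_append]; (simp [h, List.length_append]; omega)]

theorem lastHit_getLast (Q : List Int → Bool) (b : List (List Int)) :
    (if 0 ≤ lastHit Q b then some (PySem.List.pyGetD b (lastHit Q b) []) else none)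
      = (b.filter Q).getLast? := by
  induction b using List.reverseRecOn with
  | nil => simp [lastHit, PySem.List.enumerate]
  | append_singleton b t ih =>
    rw [lastHit_append, List.filter_append]
    by_cases h : Q t
    · simp [h]
    · have hb := lastHit_bound Q b
      simp only [h, if_neg, Bool.false_eq_true, not_false_iff, List.filter_cons_of_neg,
        List.filter_nil, List.append_nil]
      rw [← ih]
      by_cases h0 : 0 ≤ lastHit Q b
      · rw [pyGetD_append_lt _ _ _ _ h0 hb.2]
      · simp [h0]

-- the element at a nonnegative lastHit satisfies Q
theorem lastHit_pos_spec (Q : List Int → Bool) (b : List (List Int))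
    (h0 : 0 ≤ lastHit Q b) :
    Q (PySem.List.pyGetD b (lastHit Q b) []) = true := by
  induction b using List.reverseRecOn with
  | nil => simp [lastHit, PySem.List.enumerate] at h0
  | append_singleton b t ih =>
    rw [lastHit_append] at h0 ⊢
    by_cases h : Q t
    · simp [h]
    · have hb := lastHit_bound Q b
      simp only [h, if_neg, Bool.false_eq_true, not_false_iff] at h0 ⊢
      rw [pyGetD_append_lt _ _ _ _ h0 hb.2]
      exact ih h0

-- every in-range index satisfying Q is at most lastHit
theorem lastHit_ub (Q : List Int → Bool) (b : List (List Int)) (j : Int)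
    (h0 : 0 ≤ j) (h1 : j < (b.length : Int))
    (hq : Q (PySem.List.pyGetD b j []) = true) : j ≤ lastHit Q b := by
  induction b using List.reverseRecOn with
  | nil => simp at h1; omega
  | append_singleton b t ih =>
    rw [lastHit_append]
    by_cases hj : j = (b.length : Int)
    · subst hj
      rw [pyGetD_append_self] at hq
      simp [hq]
    · have hlt : j < (b.length : Int) := by simp [List.length_append] at h1; omega
      rw [pyGetD_append_lt _ _ _ _ h0 hlt] at hq
      have := ih hlt hq
      by_cases h : Q t <;> simp [h] <;> omega

-- ---- occurrence-index characterization ----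

theorem occStep_getD (tj : List Int) (d : PySem.Dict Int (PySem.Set Int)) (j u : Int) :
    (tj.foldl (fun d1 star =>
        d1.insert star (PySem.Set.add (d1.getD star PySem.Set.empty) j)) d).getD u PySem.Set.empty
      = if u ∈ tj then PySem.Set.add (d.getD u PySem.Set.empty) j
        else d.getD u PySem.Set.empty := by
  induction tj generalizing d with
  | nil => simp
  | cons s tj ih =>
    simp only [List.foldl_cons, ih, PySem.Dict.getD_insert, List.mem_cons]
    by_cases hu : u = s <;> by_cases hm : u ∈ tj <;>
      simp [hu, hm]

theorem occ_getD_mem (b : List (List Int)) (u j : Int) :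
    j ∈ (occIndex b).getD u PySem.Set.empty ↔
      0 ≤ j ∧ j < (b.length : Int) ∧ (PySem.List.pyGetD b j []).contains u = true := by
  unfold occIndex
  induction b using List.reverseRecOn with
  | nil =>
    simp only [PySem.List.enumerate, List.foldl_nil]
    constructor
    · intro h
      simp [PySem.Set.empty] at h
    · rintro ⟨h0, h1, -⟩
      simp at h1
      omega
  | append_singleton b t ih =>
    rw [PySem.List.enumerate_append, List.foldl_append]
    simp only [PySem.List.enumerate, List.foldl_cons, List.foldl_nil, zero_add]
    rw [occStep_getD]
    by_cases hu : u ∈ t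
    · rw [if_pos hu]
      rw [PySem.Set.mem_add]
      constructor
      · rintro (hj | rfl)
        · have := ih.mp hj
          refine ⟨this.1, by simp [List.length_append]; omega, ?_⟩
          rw [pyGetD_append_lt _ _ _ _ this.1 this.2.1]
          exact this.2.2
        · exact ⟨by positivity, by simp [List.length_append], by
            rw [pyGetD_append_self]; simpa [List.contains_eq_mem] using hu⟩
      · rintro ⟨h0, h1, hc⟩
        by_cases hj : j = (b.length : Int)
        · right; omega
        · left
          have hlt : j < (b.length : Int) := by simp [List.length_append] at h1; omega
          rw [pyGetD_append_lt _ _ _ _ h0 hlt] at hc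
          exact ih.mpr ⟨h0, hlt, hc⟩
    · rw [if_neg hu, ih]
      constructor
      · rintro ⟨h0, h1, hc⟩
        exact ⟨h0, by simp [List.length_append]; omega, by
          rw [pyGetD_append_lt _ _ _ _ h0 h1]; exact hc⟩
      · rintro ⟨h0, h1, hc⟩
        by_cases hj : j = (b.length : Int)
        · subst hj
          rw [pyGetD_append_self] at hc
          simp [List.contains_eq_mem] at hc
          exact absurd hc hu
        · have hlt : j < (b.length : Int) := by simp [List.length_append] at h1; omega
          rw [pyGetD_append_lt _ _ _ _ h0 hlt] at hc
          exact ⟨h0, hlt, hc⟩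

-- ---- hits characterization ----

theorem mem_foldl_union {L : List (PySem.Set Int)} {init : PySem.Set Int} {j : Int} :
    j ∈ L.foldl (fun h s => PySem.Set.union h s) init ↔ j ∈ init ∨ ∃ s ∈ L, j ∈ s := by
  induction L generalizing init with
  | nil => simp
  | cons s L ih =>
    simp only [List.foldl_cons, ih, PySem.Set.mem_union, List.mem_cons]
    constructor
    · rintro ((h | h) | ⟨s', hs', hj⟩)
      · exact Or.inl h
      · exact Or.inr ⟨s, Or.inl rfl, h⟩
      · exact Or.inr ⟨s', Or.inr hs', hj⟩
    · rintro (h | ⟨s', (rfl | hs'), hj⟩)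
      · exact Or.inl (Or.inl h)
      · exact Or.inl (Or.inr hj)
      · exact Or.inr ⟨s', hs', hj⟩

theorem mem_altHits (occ : PySem.Dict Int (PySem.Set Int)) (ti : List Int) (j : Int) :
    j ∈ altHits occ ti ↔
      ∃ x y : Int, 0 ≤ x ∧ x + 1 ≤ y ∧ y < ((PySem.List.slice ti none (some 3)).length : Int) ∧
        j ∈ occ.getD (PySem.List.pyGetD (PySem.List.slice ti none (some 3)) x 0) PySem.Set.empty ∧
        j ∈ occ.getD (PySem.List.pyGetD (PySem.List.slice ti none (some 3)) y 0) PySem.Set.empty := by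
  unfold altHits
  set t := PySem.List.slice ti none (some 3) with ht
  have hflat : ∀ (init : PySem.Set Int),
      (PySem.List.pyRange 0 (t.length : Int)).foldl (fun h x =>
        (PySem.List.pyRange (x + 1) (t.length : Int)).foldl (fun h2 y =>
          PySem.Set.union h2
            (PySem.Set.inter (occ.getD (PySem.List.pyGetD t x 0) PySem.Set.empty)
                             (occ.getD (PySem.List.pyGetD t y 0) PySem.Set.empty))) h) init
      = ((PySem.List.pyRange 0 (t.length : Int)).flatMap (fun x =>
          (PySem.List.pyRange (x + 1) (t.length : Int)).map (fun y =>
            PySem.Set.inter (occ.getD (PySem.List.pyGetD t x 0) PySem.Set.empty)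
                            (occ.getD (PySem.List.pyGetD t y 0) PySem.Set.empty)))).foldl
          (fun h s => PySem.Set.union h s) init := by
    intro init
    rw [List.foldl_flatMap]
    simp only [List.foldl_map]
  rw [hflat, mem_foldl_union]
  simp only [List.mem_flatMap, List.mem_map, PySem.List.mem_pyRange_one]
  constructor
  · rintro (h | ⟨s, ⟨x, ⟨hx0, hxn⟩, y, ⟨hxy, hyn⟩, rfl⟩, hj⟩)
    · simp [PySem.Set.empty] at h
    · rw [PySem.Set.mem_inter] at hj
      exact ⟨x, y, hx0, hxy, hyn, hj.1, hj.2⟩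
  · rintro ⟨x, y, hx0, hxy, hyn, h1, h2⟩
    refine Or.inr ⟨_, ⟨x, ⟨hx0, by omega⟩, y, ⟨hxy, hyn⟩, rfl⟩, ?_⟩
    rw [PySem.Set.mem_inter]
    exact ⟨h1, h2⟩

-- for a-triplets with at least 3 stars the hit set is exactly the matching indices
theorem hits_iff_len3 (b : List (List Int)) (ti : List Int) (h : 3 ≤ ti.length) (j : Int) :
    j ∈ altHits (occIndex b) ti ↔ MatchIdx b ti j := by
  obtain ⟨a0, a1, a2, r, rfl⟩ : ∃ a0 a1 a2 r, ti = a0 :: a1 :: a2 :: r := by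
    match ti, h with
    | a0 :: a1 :: a2 :: r, _ => exact ⟨a0, a1, a2, r, rfl⟩
  have ht : PySem.List.slice (a0 :: a1 :: a2 :: r) none (some 3) = [a0, a1, a2] := by
    rw [PySem.List.slice_to _ (by norm_num)]
    rfl
  rw [mem_altHits]
  simp only [ht, List.length_cons, List.length_nil]
  unfold MatchIdx condA
  simp only [PySem.List.pyGetD_ofNat', List.getD_cons_zero, List.getD_cons_succ,
    Bool.or_eq_true, Bool.and_eq_true]
  constructor
  · rintro ⟨x, y, hx0, hxy, hyn, h1, h2⟩
    have hc : (x = 0 ∧ y = 1) ∨ (x = 0 ∧ y = 2) ∨ (x = 1 ∧ y = 2) := by omega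
    rcases hc with ⟨rfl, rfl⟩ | ⟨rfl, rfl⟩ | ⟨rfl, rfl⟩ <;>
      simp only [PySem.List.pyGetD_ofNat', List.getD_cons_zero, List.getD_cons_succ] at h1 h2
    · have e1 := (occ_getD_mem b a0 j).mp h1
      have e2 := (occ_getD_mem b a1 j).mp h2
      exact ⟨e1.1, e1.2.1, Or.inl (Or.inl ⟨e1.2.2, e2.2.2⟩)⟩
    · have e1 := (occ_getD_mem b a0 j).mp h1
      have e2 := (occ_getD_mem b a2 j).mp h2
      exact ⟨e1.1, e1.2.1, Or.inl (Or.inr ⟨e1.2.2, e2.2.2⟩)⟩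
    · have e1 := (occ_getD_mem b a1 j).mp h1
      have e2 := (occ_getD_mem b a2 j).mp h2
      exact ⟨e1.1, e1.2.1, Or.inr ⟨e1.2.2, e2.2.2⟩⟩
  · rintro ⟨h0, h1, (⟨c1, c2⟩ | ⟨c1, c2⟩) | ⟨c1, c2⟩⟩
    · refine ⟨0, 1, by omega, by omega, by omega, ?_, ?_⟩ <;>
        simp only [PySem.List.pyGetD_ofNat', List.getD_cons_zero, List.getD_cons_succ]
      · exact (occ_getD_mem b a0 j).mpr ⟨h0, h1, c1⟩
      · exact (occ_getD_mem b a1 j).mpr ⟨h0, h1, c2⟩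
    · refine ⟨0, 2, by omega, by omega, by omega, ?_, ?_⟩ <;>
        simp only [PySem.List.pyGetD_ofNat', List.getD_cons_zero, List.getD_cons_succ]
      · exact (occ_getD_mem b a0 j).mpr ⟨h0, h1, c1⟩
      · exact (occ_getD_mem b a2 j).mpr ⟨h0, h1, c2⟩
    · refine ⟨1, 2, by omega, by omega, by omega, ?_, ?_⟩ <;>
        simp only [PySem.List.pyGetD_ofNat', List.getD_cons_zero, List.getD_cons_succ]
      · exact (occ_getD_mem b a1 j).mpr ⟨h0, h1, c1⟩
      · exact (occ_getD_mem b a2 j).mpr ⟨h0, h1, c2⟩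

-- surviving 2-star a-triplets: both stars in or both out of every b-triplet
theorem hits_iff_len2 (b : List (List Int)) (u v : Int)
    (hbal : ∀ tj ∈ b, tj.contains u = tj.contains v) (j : Int) :
    j ∈ altHits (occIndex b) [u, v] ↔ MatchIdx b [u, v] j := by
  have ht : PySem.List.slice ([u, v] : List Int) none (some 3) = [u, v] := by
    rw [PySem.List.slice_to _ (by norm_num)]
    rfl
  rw [mem_altHits]
  simp only [ht, List.length_cons, List.length_nil]
  unfold MatchIdx condA
  simp only [PySem.List.pyGetD_ofNat', List.getD_cons_zero, List.getD_cons_succ, List.getD_nil,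
    Bool.or_eq_true, Bool.and_eq_true]
  constructor
  · rintro ⟨x, y, hx0, hxy, hyn, h1, h2⟩
    have hc : x = 0 ∧ y = 1 := by omega
    rcases hc with ⟨rfl, rfl⟩
    simp only [PySem.List.pyGetD_ofNat', List.getD_cons_zero, List.getD_cons_succ] at h1 h2
    have e1 := (occ_getD_mem b u j).mp h1
    have e2 := (occ_getD_mem b v j).mp h2
    exact ⟨e1.1, e1.2.1, Or.inl (Or.inl ⟨e1.2.2, e2.2.2⟩)⟩
  · rintro ⟨h0, h1, hcond⟩
    have hmem : PySem.List.pyGetD b j [] ∈ b := by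
      rw [PySem.List.pyGetD_eq_getElem _ _ h0 (by exact_mod_cast h1)]
      exact List.getElem_mem _
    have hb := hbal _ hmem
    have hc : (PySem.List.pyGetD b j []).contains u = true ∧
        (PySem.List.pyGetD b j []).contains v = true := by
      rcases hcond with (⟨c1, c2⟩ | ⟨c1, _⟩) | ⟨c1, _⟩
      · exact ⟨c1, c2⟩
      · exact ⟨c1, by rw [← hb]; exact c1⟩
      · exact ⟨by rw [hb]; exact c1, c1⟩
    refine ⟨0, 1, by omega, by omega, by omega, ?_, ?_⟩ <;>
      simp only [PySem.List.pyGetD_ofNat', List.getD_cons_zero, List.getD_cons_succ]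
    · exact (occ_getD_mem b u j).mpr ⟨h0, h1, hc.1⟩
    · exact (occ_getD_mem b v j).mpr ⟨h0, h1, hc.2⟩

-- ---- per-triplet step: B's max-of-hits equals A's last matching b-triplet ----

theorem step_eq (b : List (List Int)) (ti : List Int)
    (hiff : ∀ j, j ∈ altHits (occIndex b) ti ↔ MatchIdx b ti j)
    (best : Option (List Int × List Int)) :
    (match PySem.List.max? (altHits (occIndex b) ti) (fun x => x) with
     | some m => some (ti, PySem.List.pyGetD b m [])
     | none => best)
      = (lastB ti b).elim best (fun tj => some (ti, tj)) := by
  have hlb : lastB ti b =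
      (if 0 ≤ lastHit (fun tj => condA ti tj) b then
        some (PySem.List.pyGetD b (lastHit (fun tj => condA ti tj) b) []) else none) := by
    rw [lastHit_getLast]; rfl
  by_cases h0 : 0 ≤ lastHit (fun tj => condA ti tj) b
  · have hstar : MatchIdx b ti (lastHit (fun tj => condA ti tj) b) :=
      ⟨h0, (lastHit_bound _ b).2, lastHit_pos_spec _ b h0⟩
    have hmem := (hiff _).mpr hstar
    have hne : altHits (occIndex b) ti ≠ [] := List.ne_nil_of_mem hmem
    cases hmx : PySem.List.max? (altHits (occIndex b) ti) (fun x => x) with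
    | none =>
      rw [PySem.List.max?_eq_none_iff] at hmx
      exact absurd hmx hne
    | some m =>
      have hm := (hiff m).mp (PySem.List.max?_mem hmx)
      have h1 : m ≤ lastHit (fun tj => condA ti tj) b :=
        lastHit_ub (fun tj => condA ti tj) b m hm.1 hm.2.1 hm.2.2
      have h2 : lastHit (fun tj => condA ti tj) b ≤ m :=
        PySem.List.max?_isMax hmx _ hmem
      have : m = lastHit (fun tj => condA ti tj) b := le_antisymm h1 h2
      rw [hlb, if_pos h0, this]
      rfl
  · have hempty : altHits (occIndex b) ti = [] := by
      rw [List.eq_nil_iff_forall_not_mem]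
      intro j hj
      obtain ⟨hj0, hj1, hjc⟩ := (hiff j).mp hj
      have := lastHit_ub (fun tj => condA ti tj) b j hj0 hj1 hjc
      omega
    rw [hempty, hlb, if_neg h0]
    rfl

-- ---- B-side outer fold ----

theorem foldB_elim (b : List (List Int)) (a : List (List Int)) :
    a.foldl (fun best ti => (lastB ti b).elim best (fun tj => some (ti, tj)))
      (none : Option (List Int × List Int)) = lastPair a b := by
  induction a using List.reverseRecOn with
  | nil => simp [lastPair]
  | append_singleton a ti ih =>
    simp only [List.foldl_append, List.foldl_cons, List.foldl_nil, ih]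
    unfold lastPair
    cases h : lastB ti b with
    | none => simp [h]
    | some tj => simp [h, List.filterMap_append]

-- ---- assembly ----

theorem B_eq (a b : List (List Int)) (hpre : Pre_get_common_stars a b) :
    get_common_stars_alt a b = render (lastPair a b) := by
  have hiff : ∀ ti ∈ a, ∀ j, j ∈ altHits (occIndex b) ti ↔ MatchIdx b ti j := by
    intro ti hti j
    by_cases h3 : 3 ≤ ti.length
    · exact hits_iff_len3 b ti h3 j
    · by_cases hb : b = []
      · subst hb
        constructor
        · intro hj
          rcases (mem_altHits _ ti j).mp hj with ⟨x, y, _, _, _, h1, _⟩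
          have := (occ_getD_mem [] _ j).mp h1
          simp at this
          omega
        · rintro ⟨_, h1, _⟩
          simp at h1
          omega
      · obtain ⟨tj0, htj0⟩ := List.exists_mem_of_ne_nil b hb
        have h2 : ti.length = 2 := ((hpre ti hti tj0 htj0).resolve_left h3).1
        obtain ⟨u, v, rfl⟩ : ∃ u v, ti = [u, v] := by
          match ti, h2 with
          | [u, v], _ => exact ⟨u, v, rfl⟩
        refine hits_iff_len2 b u v (fun tj htj => ?_) j
        have hbal := ((hpre _ hti tj htj).resolve_left h3).2
        simp only [PySem.List.pyGetD_ofNat', List.getD_cons_zero, List.getD_cons_succ] at hbal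
        simp only [List.contains_eq_mem, decide_eq_decide]
        exact hbal
  have hfold : a.foldl (fun best ti =>
      match PySem.List.max? (altHits (occIndex b) ti) (fun x => x) with
      | some m => some (ti, PySem.List.pyGetD b m [])
      | none => best)
      (none : Option (List Int × List Int)) = lastPair a b := by
    rw [PySem.List.foldl_congr_mem' a _
      (fun best ti => (lastB ti b).elim best (fun tj => some (ti, tj))) none
      (fun ti hti best => step_eq b ti (hiff ti hti) best)]
    exact foldB_elim b a
  simp only [get_common_stars_alt]
  rw [hfold]
  cases lastPair a b with
  | none => rfl
  | some p => cases p; rfl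

-- ===== VERDICT (by name: the statement is the Claim_ definition above) =====
theorem get_common_stars_spec : Claim_equal_get_common_stars := by
  intro a b _ hpre
  unfold Spec_get_common_stars
  rw [outerA, B_eq a b hpre]
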